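-- pv_equiv track=rewrite | github.com/gitbyjay25/RTER | api/server.py | severity_from_decision
-- ===== SOURCE A (Python) =====
-- from enum import Enum
--
-- class Severity(str, Enum):
--     INFO = "INFO"
--     WARN = "WARN"
--     CRITICAL = "CRITICAL"
--
-- def severity_from_decision(decision):
--     codes = set(decision.get("reason_codes", []))
--
--     if "SEMANTIC_MISMATCH" in codes or "MEANING_DRIFT_HIGH" in codes:
--         return Severity.CRITICAL
--
--     if any(c in codes for c in [
--         "MEANING_DRIFT_MEDIUM",
--         "HIGH_REDUNDANCY",
--         "COLLAPSED_DISTRIBUTION",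
--         "DRIFT_MEAN_SHIFT",
--         "DRIFT_STD_SHIFT"
--     ]):
--         return Severity.WARN
--
--     return Severity.INFO
-- ===== SOURCE B (Python) =====
-- from enum import Enum
--
-- class Severity(str, Enum):
--     INFO = "INFO"
--     WARN = "WARN"
--     CRITICAL = "CRITICAL"
--
-- _PRIORITY = {
--     "SEMANTIC_MISMATCH": 2,
--     "MEANING_DRIFT_HIGH": 2,
--     "MEANING_DRIFT_MEDIUM": 1,
--     "HIGH_REDUNDANCY": 1,
--     "COLLAPSED_DISTRIBUTION": 1,
--     "DRIFT_MEAN_SHIFT": 1,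
--     "DRIFT_STD_SHIFT": 1,
-- }
--
-- _LEVELS = (Severity.INFO, Severity.WARN, Severity.CRITICAL)
--
-- def severity_from_decision(decision):
--     best = 0
--     for c in decision.get("reason_codes", []):
--         p = _PRIORITY.get(c, 0)
--         if p > best:
--             best = p
--     return _LEVELS[best]
-- ===== Notes on version B (the rewrite author's own statement) =====
-- stated objective: simpler
-- what changed: Replaces the set construction plus cascading membership checks with a single pass that looks each code up in a priority table and keeps the running maximum, then indexes a level tuple.
import Mathlib
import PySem

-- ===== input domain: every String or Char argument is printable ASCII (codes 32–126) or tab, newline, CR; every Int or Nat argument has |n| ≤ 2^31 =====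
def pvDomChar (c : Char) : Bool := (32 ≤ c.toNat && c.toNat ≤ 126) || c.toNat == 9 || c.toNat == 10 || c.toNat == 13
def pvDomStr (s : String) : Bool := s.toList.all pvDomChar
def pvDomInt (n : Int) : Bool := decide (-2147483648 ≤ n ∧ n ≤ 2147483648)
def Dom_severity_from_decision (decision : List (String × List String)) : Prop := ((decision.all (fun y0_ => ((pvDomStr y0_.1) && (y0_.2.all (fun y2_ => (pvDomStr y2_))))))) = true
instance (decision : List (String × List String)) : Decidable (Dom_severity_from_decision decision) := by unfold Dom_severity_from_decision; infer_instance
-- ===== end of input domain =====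

-- B replaces A's set construction and cascading membership checks by a single pass
-- taking the maximum priority from a lookup table (objective: simpler).


-- ===== PORT A =====
def severity_from_decision (decision : List (String × List String)) : String :=
  let codes : PySem.Set String :=
    PySem.Set.ofList ((PySem.Dict.mk decision).getD "reason_codes" [])
  if codes.contains "SEMANTIC_MISMATCH" || codes.contains "MEANING_DRIFT_HIGH" then
    "CRITICAL"
  else if ["MEANING_DRIFT_MEDIUM", "HIGH_REDUNDANCY", "COLLAPSED_DISTRIBUTION",
           "DRIFT_MEAN_SHIFT", "DRIFT_STD_SHIFT"].any (fun c => codes.contains c) then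
    "WARN"
  else
    "INFO"

-- ===== PORT B =====
def sevPriority : PySem.Dict String Int :=
  PySem.Dict.mk   -- Source B's dict literal (distinct keys); Dict.mk of the pair list is that dict
    [("SEMANTIC_MISMATCH", 2), ("MEANING_DRIFT_HIGH", 2),
     ("MEANING_DRIFT_MEDIUM", 1), ("HIGH_REDUNDANCY", 1),
     ("COLLAPSED_DISTRIBUTION", 1), ("DRIFT_MEAN_SHIFT", 1), ("DRIFT_STD_SHIFT", 1)]

def sevLevels : List String := ["INFO", "WARN", "CRITICAL"]

def severity_from_decision_alt (decision : List (String × List String)) : String :=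
  let best : Int :=
    ((PySem.Dict.mk decision).getD "reason_codes" []).foldl
      (fun b c => let p := sevPriority.getD c 0; if p > b then p else b) 0
  -- Source B indexes the level tuple with 'best' (always 0, 1 or 2, hence nonnegative and in range)
  PySem.List.pyGetD sevLevels best "INFO"

-- ===== PRECONDITION & SPEC =====
def Spec_severity_from_decision (decision : List (String × List String)) (out : String) : Prop := out = severity_from_decision_alt decision
instance (decision : List (String × List String)) (out : String) : Decidable (Spec_severity_from_decision decision out) := by unfold Spec_severity_from_decision; infer_instance

-- ===== CLAIM (what is proved, stated in full; the proofs are below) =====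
def Claim_equal_severity_from_decision : Prop := ∀ (decision : List (String × List String)), Dom_severity_from_decision decision → Spec_severity_from_decision decision (severity_from_decision decision)

-- ===== LEMMAS AND PROOFS =====

def sevCrit (c : String) : Bool := c == "SEMANTIC_MISMATCH" || c == "MEANING_DRIFT_HIGH"
def sevWarn (c : String) : Bool :=
  c == "MEANING_DRIFT_MEDIUM" || c == "HIGH_REDUNDANCY" || c == "COLLAPSED_DISTRIBUTION" ||
  c == "DRIFT_MEAN_SHIFT" || c == "DRIFT_STD_SHIFT"

lemma sevPri_char (c : String) :
    sevPriority.getD c 0 = if sevCrit c then 2 else if sevWarn c then 1 else 0 := by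
  by_cases h1 : c = "SEMANTIC_MISMATCH"
  · subst h1; decide
  by_cases h2 : c = "MEANING_DRIFT_HIGH"
  · subst h2; decide
  by_cases h3 : c = "MEANING_DRIFT_MEDIUM"
  · subst h3; decide
  by_cases h4 : c = "HIGH_REDUNDANCY"
  · subst h4; decide
  by_cases h5 : c = "COLLAPSED_DISTRIBUTION"
  · subst h5; decide
  by_cases h6 : c = "DRIFT_MEAN_SHIFT"
  · subst h6; decide
  by_cases h7 : c = "DRIFT_STD_SHIFT"
  · subst h7; decide
  simp [sevPriority, sevCrit, sevWarn, PySem.Dict.getD_eq_get?_getD,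
    PySem.Dict.get?_mk_cons, h1, h2, h3, h4, h5, h6, h7,
    Ne.symm h1, Ne.symm h2, Ne.symm h3, Ne.symm h4, Ne.symm h5, Ne.symm h6, Ne.symm h7,
    PySem.Dict.get?]

def sevFold (l : List String) (b : Int) : Int :=
  l.foldl (fun b c => let p := sevPriority.getD c 0; if p > b then p else b) b

lemma sevFold_step (c : String) (l : List String) (b : Int) :
    sevFold (c :: l) b = sevFold l (max b (sevPriority.getD c 0)) := by
  simp only [sevFold, List.foldl_cons]
  congr 1
  simp only [max_def]
  split_ifs <;> omega

lemma sevFold_char (l : List String) (b : Int) (hb : 0 ≤ b) :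
    sevFold l b = max b (if l.any sevCrit then 2 else if l.any sevWarn then 1 else 0) := by
  induction l generalizing b with
  | nil =>
    simp only [sevFold, List.foldl_nil, List.any_nil, if_neg (by decide : ¬ (false = true))]
    omega
  | cons c l ih =>
    rw [sevFold_step, ih _ (by positivity), sevPri_char]
    simp only [List.any_cons]
    by_cases hc : sevCrit c = true <;> by_cases hw : sevWarn c = true <;>
      by_cases hlc : l.any sevCrit = true <;> by_cases hlw : l.any sevWarn = true <;>
      simp only [hc, hw, hlc, hlw, Bool.not_eq_true] at * <;>
      simp

lemma sev_mem_any_crit (l : List String) :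
    ((PySem.Set.ofList l).contains "SEMANTIC_MISMATCH" ||
     (PySem.Set.ofList l).contains "MEANING_DRIFT_HIGH") = l.any sevCrit := by
  rw [Bool.eq_iff_iff]
  simp only [Bool.or_eq_true, PySem.Set.contains_iff,
    PySem.Set.mem_ofList, List.any_eq_true, sevCrit, beq_iff_eq]
  aesop

lemma sev_mem_any_warn (l : List String) :
    (["MEANING_DRIFT_MEDIUM", "HIGH_REDUNDANCY", "COLLAPSED_DISTRIBUTION",
      "DRIFT_MEAN_SHIFT", "DRIFT_STD_SHIFT"].any
       (fun c => (PySem.Set.ofList l).contains c)) = l.any sevWarn := by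
  rw [Bool.eq_iff_iff]
  simp only [List.any_eq_true, PySem.Set.contains_iff,
    PySem.Set.mem_ofList, sevWarn, Bool.or_eq_true, beq_iff_eq, List.mem_cons,
    List.mem_singleton, List.not_mem_nil]
  aesop

lemma sev_core (l : List String) :
    (if (PySem.Set.ofList l).contains "SEMANTIC_MISMATCH" ||
        (PySem.Set.ofList l).contains "MEANING_DRIFT_HIGH" then
       ("CRITICAL" : String)
     else if ["MEANING_DRIFT_MEDIUM", "HIGH_REDUNDANCY", "COLLAPSED_DISTRIBUTION",
              "DRIFT_MEAN_SHIFT", "DRIFT_STD_SHIFT"].any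
              (fun c => (PySem.Set.ofList l).contains c) then
       "WARN"
     else "INFO") =
    PySem.List.pyGetD sevLevels (sevFold l 0) "INFO" := by
  rw [sevFold_char l 0 le_rfl, sev_mem_any_crit, sev_mem_any_warn]
  cases hlc : l.any sevCrit <;> cases hlw : l.any sevWarn <;>
    simp [sevLevels, PySem.List.pyGetD, PySem.List.pyGet?, PySem.List.pyIdx?]

-- ===== VERDICT (by name: the statement is the Claim_ definition above) =====
theorem severity_from_decision_spec : Claim_equal_severity_from_decision := by
  intro decision _
  unfold Spec_severity_from_decision severity_from_decision severity_from_decision_alt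
  exact sev_core _
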